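-- pv_equiv track=rewrite | github.com/GVCUTV/PM_ASF | etl/4_feedback_probabilities_etl.py | _has_fail_then_success
-- ===== SOURCE A (Python) =====
-- FAILURE_TOKENS = {
--     "fail",
--     "failure",
--     "failed",
--     "error",
--     "timed_out",
--     "timeout",
--     "cancelled",
--     "canceled",
--     "aborted",
--     "broken",
-- }
--
-- SUCCESS_TOKENS = {"success", "succeeded", "passed", "ok", "green", "completed_success"}
--
-- def _has_fail_then_success(tokens: list[str]) -> bool:
--     lowered = [token.strip().lower() for token in tokens if token and str(token).strip()]
--     failure_indices = [
--         idx for idx, token in enumerate(lowered) if any(failure in token for failure in FAILURE_TOKENS)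
--     ]
--     if not failure_indices:
--         return False
--     first_failure = min(failure_indices)
--     for token in lowered[first_failure + 1 :]:
--         if any(success in token for success in SUCCESS_TOKENS):
--             return True
--     return False
-- ===== SOURCE B (Python) =====
-- FAILURE_TOKENS = {
--     "fail",
--     "failure",
--     "failed",
--     "error",
--     "timed_out",
--     "timeout",
--     "cancelled",
--     "canceled",
--     "aborted",
--     "broken",
-- }
--
-- SUCCESS_TOKENS = {"success", "succeeded", "passed", "ok", "green", "completed_success"}
--
--
-- def _has_fail_then_success(tokens: list[str]) -> bool:
--     seen_failure = False
--     for token in tokens: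
--         if not (token and str(token).strip()):
--             continue
--         low = token.strip().lower()
--         if seen_failure:
--             if any(success in low for success in SUCCESS_TOKENS):
--                 return True
--         elif any(failure in low for failure in FAILURE_TOKENS):
--             seen_failure = True
--     return False
-- ===== Notes on version B (the rewrite author's own statement) =====
-- stated objective: simpler
-- what changed: Replaces the three passes (filter+normalise list, enumerate-and-collect failure indices, min, then scan a slice) by a single-pass state machine with one boolean flag and no intermediate lists.
import Mathlib
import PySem

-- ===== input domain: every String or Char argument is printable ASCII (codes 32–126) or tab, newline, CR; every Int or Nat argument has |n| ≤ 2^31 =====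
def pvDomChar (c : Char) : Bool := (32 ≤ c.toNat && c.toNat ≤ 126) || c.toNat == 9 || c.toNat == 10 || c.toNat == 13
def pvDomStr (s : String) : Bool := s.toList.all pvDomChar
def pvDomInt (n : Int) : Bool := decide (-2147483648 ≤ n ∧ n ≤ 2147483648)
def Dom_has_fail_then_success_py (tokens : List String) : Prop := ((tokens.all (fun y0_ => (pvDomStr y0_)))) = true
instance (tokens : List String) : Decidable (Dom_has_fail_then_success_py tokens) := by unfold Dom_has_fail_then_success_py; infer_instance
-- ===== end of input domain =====

-- B replaces A's three passes (filter+normalise, collect failure indices, min, scan a slice)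
-- by a single-pass state machine with one boolean flag; return values agree everywhere (objective: simpler).

-- shared module constants (FAILURE_TOKENS / SUCCESS_TOKENS) and the shared helper expressions
def pvFailureTokens : List String :=
  ["fail", "failure", "failed", "error", "timed_out", "timeout",
   "cancelled", "canceled", "aborted", "broken"]

def pvSuccessTokens : List String :=
  ["success", "succeeded", "passed", "ok", "green", "completed_success"]

-- 'token and str(token).strip()' truthiness filter
def pvKeep (t : String) : Bool := (!(t == "")) && (!(PySem.Str.strip t == ""))

-- 'token.strip().lower()'
def pvNorm (t : String) : String := PySem.Str.lower (PySem.Str.strip t)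

-- 'any(failure in token for failure in FAILURE_TOKENS)'
def pvIsFail (low : String) : Bool := pvFailureTokens.any (fun f => PySem.Str.isIn f low)

-- 'any(success in token for success in SUCCESS_TOKENS)'
def pvIsSucc (low : String) : Bool := pvSuccessTokens.any (fun s => PySem.Str.isIn s low)

-- ===== PORT A =====
def has_fail_then_success_py (tokens : List String) : Bool :=
  let lowered := (tokens.filter pvKeep).map pvNorm
  let failure_indices :=
    ((PySem.List.enumerate lowered).filter (fun p => pvIsFail p.2)).map (fun p => p.1)
  if failure_indices = [] then false
  else
    match PySem.List.min? failure_indices (fun x => x) with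
    | none => false
    | some first_failure =>
        (PySem.List.slice lowered (some (first_failure + 1)) none).any pvIsSucc

-- ===== PORT B =====
def pvAltGo : List String → Bool → Bool
  | [], _ => false
  | token :: rest, seen_failure =>
      if pvKeep token then
        let low := pvNorm token
        if seen_failure then
          if pvIsSucc low then true else pvAltGo rest true
        else
          pvAltGo rest (pvIsFail low)
      else
        pvAltGo rest seen_failure

def has_fail_then_success_py_alt (tokens : List String) : Bool :=
  pvAltGo tokens false

-- ===== PRECONDITION & SPEC =====
def Spec_has_fail_then_success_py (tokens : List String) (out : Bool) : Prop := out = has_fail_then_success_py_alt tokens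
instance (tokens : List String) (out : Bool) : Decidable (Spec_has_fail_then_success_py tokens out) := by unfold Spec_has_fail_then_success_py; infer_instance

-- ===== CLAIM (what is proved, stated in full; the proofs are below) =====
def Claim_equal_has_fail_then_success_py : Prop := ∀ (tokens : List String), Dom_has_fail_then_success_py tokens → Spec_has_fail_then_success_py tokens (has_fail_then_success_py tokens)

-- ===== LEMMAS AND PROOFS =====

-- the pure state machine on an already filtered+normalised list
def pvCore : List String → Bool → Bool
  | [], _ => false
  | x :: l, seen =>
      if seen then
        if pvIsSucc x then true else pvCore l true
      else
        pvCore l (pvIsFail x)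

-- index (from the front) of the first failure-matching token, if any
def pvFirstFail : List String → Option Nat
  | [] => none
  | x :: l => if pvIsFail x then some 0 else (pvFirstFail l).map (· + 1)

lemma pvAltGo_eq (tokens : List String) :
    ∀ seen, pvAltGo tokens seen = pvCore ((tokens.filter pvKeep).map pvNorm) seen := by
  induction tokens with
  | nil => intro seen; rfl
  | cons t rest ih =>
      intro seen
      by_cases hk : pvKeep t = true
      · simp [pvAltGo, pvCore, hk, ih]
      · simp [pvAltGo, hk, ih]

lemma pvCore_true (l : List String) : pvCore l true = l.any pvIsSucc := by
  induction l with
  | nil => rfl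
  | cons x l ih =>
      by_cases h : pvIsSucc x = true <;> simp [pvCore, h, ih]

lemma pvCore_false (l : List String) :
    pvCore l false =
      (match pvFirstFail l with
       | none => false
       | some k => (l.drop (k + 1)).any pvIsSucc) := by
  induction l with
  | nil => rfl
  | cons x l ih =>
      by_cases h : pvIsFail x = true
      · simp [pvCore, pvFirstFail, h, pvCore_true]
      · simp only [pvCore, pvFirstFail, h]
        rw [if_neg (by simp), ih]
        cases hf : pvFirstFail l <;> simp

lemma pv_mem_F_ge (l : List String) :
    ∀ (s : Int) (y : Int),
      y ∈ ((PySem.List.enumerate l s).filter (fun p => pvIsFail p.2)).map (fun p => p.1) →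
      s ≤ y := by
  induction l with
  | nil => intro s y h; simp [PySem.List.enumerate] at h
  | cons x l ih =>
      intro s y h
      rw [PySem.List.enumerate_cons, List.filter_cons] at h
      by_cases hx : pvIsFail x = true
      · simp only [hx, if_true] at h
        rw [List.map_cons] at h
        rcases List.mem_cons.1 h with rfl | hm
        · exact le_refl _
        · have := ih (s+1) y hm; omega
      · simp only [hx, if_false, Bool.false_eq_true] at h
        have := ih (s+1) y h; omega

lemma pv_head_min (x : Int) (t : List Int) (h : ∀ y ∈ t, x ≤ y) :
    PySem.List.min? (x :: t) (fun y => y) = some x := by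
  rw [PySem.List.min?_id_cons]
  have hmem := PySem.List.foldl_min_mem t x
  have hle := (PySem.List.foldl_min_le t x).1
  rcases hmem with he | hm
  · rw [he]
  · rw [le_antisymm hle (h _ hm)]

lemma pvMinFail_eq (l : List String) :
    ∀ s : Int,
      PySem.List.min?
        (((PySem.List.enumerate l s).filter (fun p => pvIsFail p.2)).map (fun p => p.1))
        (fun x => x) =
      (match pvFirstFail l with
       | none => none
       | some k => some (s + (k : Int))) := by
  induction l with
  | nil => intro s; rfl
  | cons x l ih =>
      intro s
      rw [PySem.List.enumerate_cons]
      by_cases h : pvIsFail x = true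
      · rw [List.filter_cons_of_pos (by simpa using h), List.map_cons]
        rw [pv_head_min s _ (fun y hy => by have := pv_mem_F_ge l (s+1) y hy; omega)]
        simp [pvFirstFail, h]
      · rw [List.filter_cons_of_neg (by simpa using h), ih (s+1)]
        simp only [pvFirstFail, h, if_neg Bool.false_ne_true]
        cases pvFirstFail l with
        | none => rfl
        | some k => simp [Option.map_some]; ring

lemma pvA_eq_spec (tokens : List String) :
    has_fail_then_success_py tokens =
      (match pvFirstFail ((tokens.filter pvKeep).map pvNorm) with
       | none => false
       | some k => ((((tokens.filter pvKeep).map pvNorm)).drop (k + 1)).any pvIsSucc) := by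
  have hmin := pvMinFail_eq ((tokens.filter pvKeep).map pvNorm) 0
  simp only [has_fail_then_success_py]
  cases hf : pvFirstFail ((tokens.filter pvKeep).map pvNorm) with
  | none =>
      rw [hf] at hmin
      have he := (PySem.List.min?_eq_none_iff _ _).1 hmin
      rw [he]
      simp
  | some k =>
      rw [hf] at hmin
      have hne : ((PySem.List.enumerate ((tokens.filter pvKeep).map pvNorm) 0).filter
          (fun p => pvIsFail p.2)).map (fun p => p.1) ≠ [] := by
        intro he
        rw [he] at hmin
        simp [PySem.List.min?] at hmin
      rw [if_neg hne, hmin]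
      have h1 : (0 : Int) + (k : Int) + 1 = ((k + 1 : Nat) : Int) := by push_cast; ring
      simp only [h1, PySem.List.slice_from_natCast]

-- ===== VERDICT (by name: the statement is the Claim_ definition above) =====
theorem has_fail_then_success_py_spec : Claim_equal_has_fail_then_success_py := by
  intro tokens _
  unfold Spec_has_fail_then_success_py has_fail_then_success_py_alt
  rw [pvAltGo_eq, pvCore_false, pvA_eq_spec]
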